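-- pv_equiv track=rewrite | github.com/rohansaini886/Hacktoberfest2022 | Python/NumbersWithSameConsecutiveDifferences.py | solve
-- ===== SOURCE A (Python) =====
-- from collections import deque
--
-- def solve(N, K):
--     if N == 1:
--         return list(range(10))
--     queue = deque(list(range(1, 10)))
--     for n in range(N - 1):
--         len_queue = len(queue)
--         for j in range(len_queue):
--             num = queue.popleft()
--             lsd = num % 10
--             if lsd - K >= 0:
--                 queue.append(num * 10 + lsd - K)
--             if K and lsd + K <= 9:
--                 queue.append(num * 10 + lsd + K)
--     return list(queue)
-- ===== SOURCE B (Python) =====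
-- def solve(N, K):
--     if N == 1:
--         return list(range(10))
--     out = []
--     stack = [(d, N - 1) for d in range(9, 0, -1)]
--     while stack:
--         num, rem = stack.pop()
--         if rem <= 0:
--             out.append(num)
--             continue
--         lsd = num % 10
--         if K and lsd + K <= 9:
--             stack.append((num * 10 + lsd + K, rem - 1))
--         if lsd - K >= 0:
--             stack.append((num * 10 + lsd - K, rem - 1))
--     return out
-- ===== Notes on version B (the rewrite author's own statement) =====
-- stated objective: faster
-- what changed: Replaces A's level-by-level BFS over a deque with an explicit-stack DFS that emits each completed number in preorder (same order, since all results sit at the same depth) and stops as soon as the stack is empty, whereas A runs all N-1 level passes even after the queue has emptied.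
import Mathlib
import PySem

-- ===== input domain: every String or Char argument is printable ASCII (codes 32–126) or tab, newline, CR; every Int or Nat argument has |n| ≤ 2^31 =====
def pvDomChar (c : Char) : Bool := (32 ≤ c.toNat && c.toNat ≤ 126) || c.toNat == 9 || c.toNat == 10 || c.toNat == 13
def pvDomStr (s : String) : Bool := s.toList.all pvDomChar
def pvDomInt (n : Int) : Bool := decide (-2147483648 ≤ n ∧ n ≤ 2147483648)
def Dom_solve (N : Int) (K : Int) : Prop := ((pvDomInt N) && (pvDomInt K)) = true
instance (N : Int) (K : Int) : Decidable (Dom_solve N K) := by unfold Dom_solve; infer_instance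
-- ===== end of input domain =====

-- B replaces A's level-by-level BFS over a deque with a recursive DFS emitting completed
-- numbers in preorder (same order, since all results sit at the same depth); objective: alternative.

-- ===== PORT A =====
-- inner 'for j in range(len_queue)' loop: pop the front, conditionally append the one or two children
def solveInner (K : Int) : Nat → List Int → List Int
  | 0, q => q
  | _ + 1, [] => []   -- unreachable: the loop runs exactly len(queue) times
  | j + 1, num :: rest =>
      let lsd := PySem.Int.mod num 10
      let q1 := if lsd - K ≥ 0 then rest ++ [num * 10 + (lsd - K)] else rest
      let q2 := if K ≠ 0 ∧ lsd + K ≤ 9 then q1 ++ [num * 10 + (lsd + K)] else q1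
      solveInner K j q2

def solve (N : Int) (K : Int) : List Int :=
  if N == 1 then PySem.List.pyRange 0 10 1
  else
    let queue := PySem.List.pyRange 1 10 1
    (PySem.List.pyRange 0 (N - 1) 1).foldl (fun q _ => solveInner K q.length q) queue

-- ===== PORT B =====
-- explicit-stack DFS of Source B; the Python list's top (its right end) is the head of the Lean list,
-- so the two conditional pushes cons in the same order (+K first, then -K) and .pop() is head-match
def stackMeasure (stack : List (Int × Int)) : Nat := (stack.map (fun p => 3 ^ p.2.toNat)).sum

theorem stackMeasure_cons (p : Int × Int) (rest : List (Int × Int)) :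
    stackMeasure (p :: rest) = 3 ^ p.2.toNat + stackMeasure rest := by
  simp [stackMeasure]

def dfsLoop (K : Int) (stack : List (Int × Int)) (out : List Int) : List Int :=
  match stack with
  | [] => out
  | (num, rem) :: rest =>
    if rem ≤ 0 then dfsLoop K rest (out ++ [num])
    else
      let lsd := PySem.Int.mod num 10
      let st1 := if K ≠ 0 ∧ lsd + K ≤ 9 then (num * 10 + (lsd + K), rem - 1) :: rest else rest
      let st2 := if lsd - K ≥ 0 then (num * 10 + (lsd - K), rem - 1) :: st1 else st1
      dfsLoop K st2 out
termination_by stackMeasure stack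
decreasing_by
  · simp [stackMeasure_cons]
  · have he : 3 ^ rem.toNat = 3 ^ (rem.toNat - 1) * 3 := by
      have h1 : rem.toNat = (rem.toNat - 1) + 1 := by omega
      rw [h1, pow_succ]
      simp
    have hp : 0 < 3 ^ (rem.toNat - 1) := pow_pos (by norm_num) _
    split_ifs <;> simp [stackMeasure_cons] <;> omega

def solve_alt (N : Int) (K : Int) : List Int :=
  if N == 1 then PySem.List.pyRange 0 10 1
  else dfsLoop K (((PySem.List.pyRange 9 0 (-1)).map (fun d => (d, N - 1))).reverse) []

-- ===== PRECONDITION & SPEC =====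
def Spec_solve (N : Int) (K : Int) (out : List Int) : Prop := out = solve_alt N K
instance (N : Int) (K : Int) (out : List Int) : Decidable (Spec_solve N K out) := by unfold Spec_solve; infer_instance

-- ===== CLAIM (what is proved, stated in full; the proofs are below) =====
def Claim_equal_solve : Prop := ∀ (N : Int) (K : Int), Dom_solve N K → Spec_solve N K (solve N K)

-- ===== LEMMAS AND PROOFS =====

-- the (one or two) children a node contributes, in A's append order = B's recursion order
def children (K : Int) (num : Int) : List Int :=
  (if PySem.Int.mod num 10 - K ≥ 0 then [num * 10 + (PySem.Int.mod num 10 - K)] else []) ++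
  (if K ≠ 0 ∧ PySem.Int.mod num 10 + K ≤ 9 then [num * 10 + (PySem.Int.mod num 10 + K)] else [])

-- all depth-n descendants of num, left to right
def grow (K : Int) : Nat → Int → List Int
  | 0, num => [num]
  | n + 1, num => (children K num).flatMap (grow K n)

theorem inner_spec (K : Int) (xs : List Int) : ∀ (ys : List Int),
    solveInner K xs.length (xs ++ ys) = ys ++ xs.flatMap (children K) := by
  induction xs with
  | nil => intro ys; simp [solveInner]
  | cons num rest ih =>
      intro ys
      show solveInner K (rest.length + 1) (num :: (rest ++ ys)) = _
      rw [solveInner]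
      split_ifs with h1 h2 h2 <;>
        simp only [List.append_assoc, List.flatMap_cons] <;> rw [ih] <;>
        simp_all [children, PySem.Int.mod] <;>
        rw [if_neg (not_le.mpr h2), if_neg (fun hc => absurd hc.2 (not_le.mpr (h1 hc.1)))] <;> simp

theorem outer_spec (K : Int) (l : List Int) : ∀ (q : List Int),
    l.foldl (fun q _ => solveInner K q.length q) q = q.flatMap (grow K l.length) := by
  induction l with
  | nil => intro q; simp [grow]
  | cons x l ih =>
      intro q
      have h := inner_spec K q []
      simp only [List.append_nil] at h
      simp only [List.foldl_cons, h, ih, List.length_cons, List.nil_append]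
      rw [List.flatMap_assoc]
      rfl

theorem dfsLoop_spec (K : Int) : ∀ (n : Nat) (stack : List (Int × Int)) (out : List Int),
    stackMeasure stack ≤ n →
    dfsLoop K stack out = out ++ stack.flatMap (fun p => grow K p.2.toNat p.1) := by
  intro n
  induction n with
  | zero =>
      intro stack out h
      cases stack with
      | nil => simp [dfsLoop]
      | cons p rest =>
          exfalso
          have : 0 < 3 ^ p.2.toNat := pow_pos (by norm_num) _
          rw [stackMeasure_cons] at h; omega
  | succ n ih =>
      intro stack out h
      match stack with
      | [] => simp [dfsLoop]
      | (num, rem) :: rest =>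
          have h' : 3 ^ rem.toNat + stackMeasure rest ≤ n + 1 := by
            rw [stackMeasure_cons] at h; simpa using h
          have hp : 0 < 3 ^ rem.toNat := pow_pos (by norm_num) _
          rw [dfsLoop]
          by_cases hle : rem ≤ 0
          · have h0 : rem.toNat = 0 := by omega
            rw [if_pos hle, ih rest _ (by omega)]
            simp [h0, grow]
          · rw [if_neg hle]
            have hm : rem.toNat = (rem - 1).toNat + 1 := by omega
            have hnorm : (rem - 1).toNat = rem.toNat - 1 := by omega
            have he : 3 ^ rem.toNat = 3 ^ (rem.toNat - 1) * 3 := by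
              rw [← hnorm, hm, pow_succ]
            have hq : 0 < 3 ^ (rem.toNat - 1) := pow_pos (by norm_num) _
            simp only [List.flatMap_cons, hm, grow, children]
            split_ifs with h1 h2 h2 <;>
              rw [ih _ out (by first
                | (simp [stackMeasure_cons, hnorm]; omega)
                | omega)] <;>
              simp [List.append_assoc]

-- ===== VERDICT (by name: the statement is the Claim_ definition above) =====
theorem solve_spec : Claim_equal_solve := by
  intro N K _
  unfold Spec_solve solve solve_alt
  by_cases h1 : N == 1
  · simp [h1]
  · simp only [h1, Bool.false_eq_true, if_false]
    rw [outer_spec, dfsLoop_spec K (stackMeasure _) _ _ le_rfl,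
      PySem.List.pyRange_neg_one_eq_reverse]
    simp only [List.map_reverse, List.reverse_reverse, List.nil_append, List.flatMap_map,
      PySem.List.length_pyRange_one]
    norm_num
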